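-- pv_equiv track=rewrite | github.com/amilkyboi/moc | src/test/expansion_fan.py | find_left_chars
-- ===== SOURCE A (Python) =====
-- def find_left_chars(num: int) -> list[list[int]]:
--     '''
--     Finds the indices of the points that lie on each left-running characteristic.
--
--     Args:
--         num (int): characteristic point index
--
--     Returns:
--         list[list[int]]: list for each point index containing which points follow in a decreasing
--                          sequence
--     '''
--
--     result = []
--     start  = 1
--
--     # Decrement since the first list element is largest
--     for i in range(num, 1, -1):
--         sublist = list(range(start, start + i))
--         result.append(sublist)
--         start += i
--
--     return result
-- ===== SOURCE B (Python) =====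
-- def find_left_chars(num: int) -> list[list[int]]:
--     # Closed-form starts: the j-th sublist begins at 1 + j*num - j*(j-1)//2
--     # and has length num - j; no running accumulator.
--     return [
--         list(range(1 + j * num - j * (j - 1) // 2,
--                    1 + j * num - j * (j - 1) // 2 + (num - j)))
--         for j in range(num - 1)
--     ]
-- ===== Notes on version B (the rewrite author's own statement) =====
-- stated objective: alternative
-- what changed: Replaces A's sequential loop with a running 'start' accumulator by a direct comprehension that computes each sublist's start in closed form (1 + j*num - j*(j-1)//2) independently for each j.
import Mathlib
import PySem

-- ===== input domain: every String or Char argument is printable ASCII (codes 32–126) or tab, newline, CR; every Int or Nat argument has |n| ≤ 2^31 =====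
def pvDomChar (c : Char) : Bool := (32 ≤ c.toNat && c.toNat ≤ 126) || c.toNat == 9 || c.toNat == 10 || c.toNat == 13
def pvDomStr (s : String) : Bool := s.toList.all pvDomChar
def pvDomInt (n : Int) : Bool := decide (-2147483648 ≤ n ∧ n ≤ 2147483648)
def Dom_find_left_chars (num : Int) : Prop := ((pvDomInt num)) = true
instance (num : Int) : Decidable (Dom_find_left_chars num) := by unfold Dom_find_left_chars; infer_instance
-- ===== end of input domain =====

-- B replaces A's running-start loop by a comprehension with a closed-form start for each sublist (alternative decomposition, same cost).


-- ===== PORT A =====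
def find_left_chars (num : Int) : List (List Int) :=
  ((PySem.List.pyRange num 1 (-1)).foldl
    (fun (st : List (List Int) × Int) i =>
      (st.1 ++ [PySem.List.pyRange st.2 (st.2 + i) 1], st.2 + i))
    ([], 1)).1

-- ===== PORT B =====
def find_left_chars_alt (num : Int) : List (List Int) :=
  (PySem.List.pyRange 0 (num - 1) 1).map (fun j =>
    PySem.List.pyRange (1 + j * num - PySem.Int.floordiv (j * (j - 1)) 2)
      (1 + j * num - PySem.Int.floordiv (j * (j - 1)) 2 + (num - j)) 1)

-- ===== PRECONDITION & SPEC =====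
def Spec_find_left_chars (num : Int) (out : List (List Int)) : Prop := out = find_left_chars_alt num
instance (num : Int) (out : List (List Int)) : Decidable (Spec_find_left_chars num out) := by unfold Spec_find_left_chars; infer_instance

-- ===== CLAIM (what is proved, stated in full; the proofs are below) =====
def Claim_equal_find_left_chars : Prop := ∀ (num : Int), Dom_find_left_chars num → Spec_find_left_chars num (find_left_chars num)

-- ===== LEMMAS AND PROOFS =====

-- Common characterisation: the list of chunks starting at `start`, sizes num, num-1, …, 2.
def pvChunks (num start : Int) : List (List Int) :=
  if _h : 1 < num then
    PySem.List.pyRange start (start + num) 1 :: pvChunks (num - 1) (start + num)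
  else []
termination_by (num - 1).toNat
decreasing_by omega

lemma pvChunks_nil {num : Int} (h : num ≤ 1) (start : Int) : pvChunks num start = [] := by
  rw [pvChunks]; simp [not_lt.mpr h]

lemma pvChunks_cons {num : Int} (h : 1 < num) (start : Int) :
    pvChunks num start = PySem.List.pyRange start (start + num) 1 :: pvChunks (num - 1) (start + num) := by
  rw [pvChunks]; simp [h]

-- A's loop builds pvChunks.
lemma aLoop_eq (n : Nat) : ∀ (num start : Int) (acc : List (List Int)), (num - 1).toNat = n →
    ((PySem.List.pyRange num 1 (-1)).foldl
      (fun (st : List (List Int) × Int) i =>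
        (st.1 ++ [PySem.List.pyRange st.2 (st.2 + i) 1], st.2 + i))
      (acc, start)).1 = acc ++ pvChunks num start := by
  induction n with
  | zero =>
    intro num start acc h
    have hle : num ≤ 1 := by omega
    rw [PySem.List.pyRange_neg_one_eq_nil hle, pvChunks_nil hle]
    simp
  | succ n ih =>
    intro num start acc h
    have hlt : 1 < num := by omega
    rw [PySem.List.pyRange_neg_one_cons hlt, pvChunks_cons hlt]
    simp only [List.foldl_cons]
    rw [ih (num - 1) (start + num) _ (by omega)]
    simp

lemma pvEvenDiv (j : Int) : PySem.Int.floordiv (j * (j - 1)) 2 * 2 = j * (j - 1) := by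
  have he : Even (j * (j - 1)) := by
    have := Int.even_mul_succ_self (j - 1)
    simpa [mul_comm, sub_add_cancel] using this
  have hdvd : (2 : Int) ∣ j * (j - 1) := he.two_dvd
  have hm : PySem.Int.mod (j * (j - 1)) 2 = 0 :=
    (PySem.Int.mod_eq_zero_iff_dvd _ _).mpr hdvd
  have := PySem.Int.floordiv_mul_add_mod (j * (j - 1)) 2
  omega

-- B's map from index j0 onwards equals pvChunks (num - j0) (closed-form start).
lemma bMap_eq (n : Nat) : ∀ (num j0 : Int), 0 ≤ j0 → (num - 1 - j0).toNat = n →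
    ((PySem.List.pyRange j0 (num - 1) 1).map (fun j =>
      PySem.List.pyRange (1 + j * num - PySem.Int.floordiv (j * (j - 1)) 2)
        (1 + j * num - PySem.Int.floordiv (j * (j - 1)) 2 + (num - j)) 1))
    = pvChunks (num - j0) (1 + j0 * num - PySem.Int.floordiv (j0 * (j0 - 1)) 2) := by
  induction n with
  | zero =>
    intro num j0 hj0 h
    have hle : num - 1 ≤ j0 := by omega
    rw [PySem.List.pyRange_one_eq_nil hle, pvChunks_nil (by omega)]
    simp
  | succ n ih =>
    intro num j0 hj0 h
    have hlt : j0 < num - 1 := by omega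
    rw [PySem.List.pyRange_one_cons hlt, pvChunks_cons (by omega : (1:Int) < num - j0)]
    simp only [List.map_cons]
    rw [ih num (j0 + 1) (by omega) (by omega)]
    have h1 := pvEvenDiv j0
    have h2 := pvEvenDiv (j0 + 1)
    have hstart : 1 + (j0 + 1) * num - PySem.Int.floordiv ((j0 + 1) * (j0 + 1 - 1)) 2
        = (1 + j0 * num - PySem.Int.floordiv (j0 * (j0 - 1)) 2) + (num - j0) := by
      nlinarith [h1, h2]
    have hnum : num - (j0 + 1) = num - j0 - 1 := by ring
    rw [hnum, hstart]

-- ===== VERDICT (by name: the statement is the Claim_ definition above) =====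
theorem find_left_chars_spec : Claim_equal_find_left_chars := by
  intro num _
  unfold Spec_find_left_chars find_left_chars find_left_chars_alt
  rw [aLoop_eq (num - 1).toNat num 1 [] rfl,
      bMap_eq (num - 1).toNat num 0 le_rfl (by omega)]
  norm_num [PySem.Int.floordiv]
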